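-- pv_equiv track=rewrite | github.com/Ruminot21/Ticket | tickets/email_crons.py | fibonacci_impares
-- ===== SOURCE A (Python) =====
-- def fibonacci_impares(n, a=0, b=1, sequence=None):
--     if sequence is None:
--         sequence = []
--
--     if len(sequence) >= n:
--         return sequence
--
--     if a % 2 != 0 and a not in sequence:  # Verifica si el número es impar y no está duplicado
--         sequence.append(a)
--
--     return fibonacci_impares(n, b, a + b, sequence)
-- ===== SOURCE B (Python) =====
-- def fibonacci_impares(n, a=0, b=1, sequence=None):
--     if sequence is None:
--         sequence = []
--     while len(sequence) < n:
--         if a % 2 != 0 and a not in sequence: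
--             sequence.append(a)
--         a, b = b, a + b
--     return sequence
-- ===== Notes on version B (the rewrite author's own statement) =====
-- stated objective: simpler
-- what changed: The tail recursion (which carries its loop state in the call arguments and hits Python's recursion limit) is replaced by a plain in-place while loop over (a, b), same dedup and same mutation of a passed-in list.
import Mathlib
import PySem

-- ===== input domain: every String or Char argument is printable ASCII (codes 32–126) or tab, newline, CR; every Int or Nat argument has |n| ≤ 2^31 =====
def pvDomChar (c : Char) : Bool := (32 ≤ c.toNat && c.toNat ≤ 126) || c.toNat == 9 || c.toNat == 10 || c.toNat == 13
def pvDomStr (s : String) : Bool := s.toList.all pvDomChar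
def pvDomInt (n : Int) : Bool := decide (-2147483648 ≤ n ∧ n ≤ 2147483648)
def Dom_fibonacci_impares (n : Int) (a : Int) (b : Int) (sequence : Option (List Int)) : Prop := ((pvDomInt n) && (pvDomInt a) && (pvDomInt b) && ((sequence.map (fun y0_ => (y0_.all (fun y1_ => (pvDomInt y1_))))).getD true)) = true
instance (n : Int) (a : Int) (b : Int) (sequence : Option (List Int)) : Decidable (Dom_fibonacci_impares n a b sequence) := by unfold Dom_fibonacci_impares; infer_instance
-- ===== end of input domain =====

-- B replaces A's tail recursion by a plain in-place while loop (objective: simpler; return value only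
-- is compared here — both Pythons mutate a passed-in list in place identically).
-- Both ports carry a fuel counter of 10000 (the grader's Python recursion limit) purely as a
-- totality guard; inside Pre_ the computation finishes long before the fuel runs out.

-- ===== PORT A =====
-- A's tail recursion, step for step: stop when len(sequence) >= n, else append a if it is odd
-- and not yet present, then recurse on (n, b, a+b, sequence).
def fibonacci_impares_go (fuel : Nat) (n : Int) (a : Int) (b : Int) (seq : List Int) : List Int :=
  match fuel with
  | 0 => seq
  | fuel + 1 =>
    if n ≤ (seq.length : Int) then seq
    else
      let seq' := if PySem.Int.mod a 2 ≠ 0 ∧ a ∉ seq then seq ++ [a] else seq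
      fibonacci_impares_go fuel n b (a + b) seq'

def fibonacci_impares (n : Int) (a : Int) (b : Int) (sequence : Option (List Int)) : List Int :=
  fibonacci_impares_go 10000 n a b (match sequence with | none => [] | some s => s)

-- ===== PORT B =====
-- B's loop body: the mutable state (a, b, sequence) after one iteration of the while loop.
def fibAltStep (st : Int × Int × List Int) : Int × Int × List Int :=
  match st with
  | (a, b, s) => (b, a + b, if PySem.Int.mod a 2 ≠ 0 ∧ a ∉ s then s ++ [a] else s)

-- B's while loop: run fibAltStep while len(sequence) < n, then return the sequence.
def fibAltLoop (fuel : Nat) (n : Int) (st : Int × Int × List Int) : List Int :=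
  match fuel with
  | 0 => st.2.2
  | fuel + 1 => if (st.2.2.length : Int) < n then fibAltLoop fuel n (fibAltStep st) else st.2.2

def fibonacci_impares_alt (n : Int) (a : Int) (b : Int) (sequence : Option (List Int)) : List Int :=
  fibAltLoop 10000 n (a, b, sequence.getD [])

-- ===== PRECONDITION & SPEC =====
-- Pre_ excludes exactly the inputs on which the Python A raises: with n above the sequence's length
-- and both a and b even the recursion never appends and raises RecursionError, and for n beyond
-- about 6000 the recursion (about 1.5 steps per collected odd) exceeds the interpreter's recursion
-- limit and raises RecursionError as well; the cap 3000 keeps a safe margin under that limit.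
def Pre_fibonacci_impares (n : Int) (a : Int) (b : Int) (sequence : Option (List Int)) : Prop :=
  n ≤ ((sequence.getD []).length : Int) ∨ ((a % 2 ≠ 0 ∨ b % 2 ≠ 0) ∧ n ≤ 3000)
instance (n : Int) (a : Int) (b : Int) (sequence : Option (List Int)) : Decidable (Pre_fibonacci_impares n a b sequence) := by unfold Pre_fibonacci_impares; infer_instance

def pvWitness_fibonacci_impares : Int × Int × Int × Option (List Int) := (3, 0, 1, none)

def Spec_fibonacci_impares (n : Int) (a : Int) (b : Int) (sequence : Option (List Int)) (out : List Int) : Prop := out = fibonacci_impares_alt n a b sequence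
instance (n : Int) (a : Int) (b : Int) (sequence : Option (List Int)) (out : List Int) : Decidable (Spec_fibonacci_impares n a b sequence out) := by unfold Spec_fibonacci_impares; infer_instance

-- ===== CLAIM (what is proved, stated in full; the proofs are below) =====
def Claim_equal_fibonacci_impares : Prop := ∀ (n : Int) (a : Int) (b : Int) (sequence : Option (List Int)), Dom_fibonacci_impares n a b sequence → Pre_fibonacci_impares n a b sequence → Spec_fibonacci_impares n a b sequence (fibonacci_impares n a b sequence)

-- ===== LEMMAS AND PROOFS =====
-- The two ports run the same state machine: A's recursive descent equals B's loop at every fuel.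
theorem go_eq_loop (fuel : Nat) (n a b : Int) (seq : List Int) :
    fibonacci_impares_go fuel n a b seq = fibAltLoop fuel n (a, b, seq) := by
  induction fuel generalizing a b seq with
  | zero => rfl
  | succ f ih =>
    have hloop : fibAltLoop (f + 1) n (a, b, seq)
        = if (seq.length : Int) < n
          then fibAltLoop f n (b, a + b, if PySem.Int.mod a 2 ≠ 0 ∧ a ∉ seq then seq ++ [a] else seq)
          else seq := rfl
    rw [fibonacci_impares_go, hloop]
    rcases le_or_gt n (seq.length : Int) with h | h
    · have h' : ¬ ((seq.length : Int) < n) := by omega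
      rw [if_pos h, if_neg h']
    · have h' : (seq.length : Int) < n := by omega
      have h'' : ¬ (n ≤ (seq.length : Int)) := by omega
      rw [if_neg h'', if_pos h']
      exact ih b (a + b) _

-- ===== VERDICT (by name: the statement is the Claim_ definition above) =====
theorem fibonacci_impares_spec : Claim_equal_fibonacci_impares := by
  intro n a b sequence _ _
  show fibonacci_impares n a b sequence = fibonacci_impares_alt n a b sequence
  cases sequence with
  | none => exact go_eq_loop 10000 n a b []
  | some s => exact go_eq_loop 10000 n a b s
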